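-- pv_equiv track=rewrite | github.com/Cherrion-Chen/ATQB | atqb/student.py | avoid_repeat
-- ===== SOURCE A (Python) =====
-- def avoid_repeat(l):
--     l = list(map(str, l))
--     num = {}
--
--     for i in range(len(l)):
--         try:
--             num[l[i]] += 1
--             l[i] = l[i] + '.' + str(num[l[i]]-1)
--         except:
--             num[l[i]] = 1
--
--     return l
-- ===== SOURCE B (Python) =====
-- def avoid_repeat(l):
--     ss = list(map(str, l))
--     groups = {}
--     for i, s in enumerate(ss):
--         groups.setdefault(s, []).append(i)
--     res = ss[:]
--     for idxs in groups.values():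
--         for j, i in enumerate(idxs[1:], 1):
--             res[i] = ss[i] + '.' + str(j)
--     return res
-- ===== Notes on version B (the rewrite author's own statement) =====
-- stated objective: alternative
-- what changed: Replaces A's single sequential counter-dict loop with a two-pass group-by algorithm: first build a dict mapping each stringified value to the list of its positions, then write the '.j' suffix back into the j-th later position of every group.
import Mathlib
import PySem

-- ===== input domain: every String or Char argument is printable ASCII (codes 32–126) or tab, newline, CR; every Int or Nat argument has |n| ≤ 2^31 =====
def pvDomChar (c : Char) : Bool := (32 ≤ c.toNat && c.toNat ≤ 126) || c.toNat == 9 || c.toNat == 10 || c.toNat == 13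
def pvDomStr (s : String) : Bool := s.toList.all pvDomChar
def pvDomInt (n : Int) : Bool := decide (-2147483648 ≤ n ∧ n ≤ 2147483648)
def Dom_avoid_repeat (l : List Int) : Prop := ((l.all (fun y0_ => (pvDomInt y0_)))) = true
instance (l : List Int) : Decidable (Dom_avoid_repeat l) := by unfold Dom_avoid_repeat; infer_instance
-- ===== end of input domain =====

-- B replaces A's sequential counter-dict loop with a two-pass group-by: group positions by value, then write suffixes back per group (alternative decomposition, same cost).

-- ===== PORT A =====
-- the loop body: looks the element up in the counter; on a hit bumps the count and
-- appends '.'+str(new_count-1), on a miss (Python's KeyError branch) stores 1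
def avoidRepeatGo (ss : List String) (num : PySem.Dict String Int) : List String :=
  match ss with
  | [] => []
  | s :: rest =>
    match num.get? s with
    | some c => (s ++ "." ++ PySem.Int.toStr ((c + 1) - 1)) :: avoidRepeatGo rest (num.insert s (c + 1))
    | none => s :: avoidRepeatGo rest (num.insert s 1)

def avoid_repeat (l : List Int) : List String :=
  avoidRepeatGo (l.map PySem.Int.toStr) PySem.Dict.empty

-- ===== PORT B =====
-- pass 1: 'groups.setdefault(s, []).append(i)' = groups[s] = groups.get(s, []) + [i] — Dict.modify
def avoidRepeatGroups (ss : List String) : PySem.Dict String (List Int) :=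
  (PySem.List.enumerate ss).foldl (fun d p => d.modify p.2 [] (fun v => v ++ [p.1])) PySem.Dict.empty

-- pass 2 inner loop: 'for j, i in enumerate(idxs[1:], 1): res[i] = ss[i] + "." + str(j)'
-- (res[i] = …, ss[i] via pySetD/pyGetD: exact here, every index the grouping pass stores is a valid index)
def avoidRepeatWrite (ss : List String) (res : List String) (idxs : List Int) : List String :=
  (PySem.List.enumerate (PySem.List.slice idxs (some 1) none) 1).foldl
    (fun r p => PySem.List.pySetD r p.2 (PySem.List.pyGetD ss p.2 "" ++ "." ++ PySem.Int.toStr p.1)) res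

def avoid_repeat_alt (l : List Int) : List String :=
  let ss := l.map PySem.Int.toStr
  let groups := avoidRepeatGroups ss
  let res := ss   -- res = ss[:]
  groups.values.foldl (avoidRepeatWrite ss) res

-- ===== PRECONDITION & SPEC =====
def Spec_avoid_repeat (l : List Int) (out : List String) : Prop := out = avoid_repeat_alt l
instance (l : List Int) (out : List String) : Decidable (Spec_avoid_repeat l out) := by unfold Spec_avoid_repeat; infer_instance

-- ===== CLAIM (what is proved, stated in full; the proofs are below) =====
def Claim_equal_avoid_repeat : Prop := ∀ (l : List Int), Dom_avoid_repeat l → Spec_avoid_repeat l (avoid_repeat l)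

-- ===== LEMMAS AND PROOFS =====

-- common reference: element-wise output where the i-th element is decided by the
-- count of equal strings in the (accumulated) prefix
def specGo (pre ss : List String) : List String :=
  match ss with
  | [] => []
  | s :: rest =>
    (if pre.count s ≠ 0 then s ++ "." ++ PySem.Int.toStr ((pre.count s : Nat) : Int) else s)
      :: specGo (pre ++ [s]) rest

theorem goA_eq_specGo (ss : List String) (num : PySem.Dict String Int) (pre : List String)
    (h : ∀ s, num.get? s = if pre.count s = 0 then none else some ((pre.count s : Nat) : Int)) :
    avoidRepeatGo ss num = specGo pre ss := by
  induction ss generalizing num pre with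
  | nil => simp [avoidRepeatGo, specGo]
  | cons s rest ih =>
    have hs := h s
    have hinv : ∀ t, ∀ v : Int, v = ((pre.count s : Nat) : Int) + 1 →
        (num.insert s v).get? t =
          if (pre ++ [s]).count t = 0 then none else some (((pre ++ [s]).count t : Nat) : Int) := by
      intro t v hv
      rw [PySem.Dict.get?_insert]
      by_cases ht : t = s
      · subst ht
        simp [List.count_append, hv]
      · have hst : ¬ s = t := fun e => ht e.symm
        simp [ht, h t, List.count_append, hst]
    by_cases h0 : pre.count s = 0
    · rw [if_pos h0] at hs
      simp only [avoidRepeatGo, specGo, hs, h0, ne_eq, not_true_eq_false, if_false,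
        List.cons.injEq, true_and]
      exact ih _ (pre ++ [s]) (fun t => hinv t _ (by rw [h0]; ring))
    · simp only [if_neg h0] at hs
      simp only [avoidRepeatGo, specGo, hs, ne_eq, h0, not_false_iff, if_true,
        List.cons.injEq]
      refine ⟨by rw [show ((pre.count s : Nat) : Int) + 1 - 1 = ((pre.count s : Nat) : Int) by ring], ?_⟩
      exact ih _ (pre ++ [s]) (fun t => hinv t _ rfl)

theorem length_specGo (ss : List String) : ∀ pre, (specGo pre ss).length = ss.length := by
  induction ss with
  | nil => intro pre; simp [specGo]
  | cons s rest ih => intro pre; simp [specGo, ih]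

theorem specGo_getElem? (ss : List String) : ∀ (pre : List String) (q : Nat) (hq : q < ss.length),
    (specGo pre ss)[q]? =
      some (if (pre ++ ss.take q).count ss[q] = 0 then ss[q]
            else ss[q] ++ "." ++ PySem.Int.toStr (((pre ++ ss.take q).count ss[q] : Nat) : Int)) := by
  induction ss with
  | nil => intro pre q hq; simp at hq
  | cons s rest ih =>
    intro pre q hq
    cases q with
    | zero =>
      by_cases h0 : pre.count s = 0 <;> simp [specGo, h0]
    | succ q =>
      have hq' : q < rest.length := by simpa using hq
      have := ih (pre ++ [s]) q hq'
      simp only [specGo, List.getElem?_cons_succ, List.take_succ_cons, List.getElem_cons_succ]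
      rw [this, List.append_assoc]
      simp

-- index list of the occurrences of s in ss, positions counted from k
def idxsF (k : Int) (ss : List String) (s : String) : List Int :=
  match ss with
  | [] => []
  | t :: rest => (if t == s then [k] else []) ++ idxsF (k + 1) rest s

theorem idxsF_mem (ss : List String) : ∀ (k : Int) (s : String) (i : Int), i ∈ idxsF k ss s →
    ∃ (q : Nat), i = k + q ∧ ∃ (hq : q < ss.length), ss[q] = s := by
  induction ss with
  | nil => intro k s i h; simp [idxsF] at h
  | cons t rest ih =>
    intro k s i h
    simp only [idxsF, List.mem_append] at h
    rcases h with h | h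
    · have ht : t == s := by by_contra hc; simp [hc] at h
      rw [if_pos ht] at h
      simp at h
      exact ⟨0, by simpa using h, by simpa using Nat.succ_pos rest.length, by simpa using (beq_iff_eq.mp ht)⟩
    · obtain ⟨q, hi, hq, hsq⟩ := ih (k + 1) s i h
      exact ⟨q + 1, by push_cast [hi]; ring, by simpa using Nat.succ_lt_succ hq,
        by simpa using hsq⟩

theorem idxsF_getElem?_some (ss : List String) : ∀ (k : Int) (s : String) (j : Nat) (i : Int),
    (idxsF k ss s)[j]? = some i →
    ∃ (q : Nat), i = k + q ∧ ∃ (hq : q < ss.length), ss[q] = s ∧ (ss.take q).count s = j := by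
  induction ss with
  | nil => intro k s j i h; simp [idxsF] at h
  | cons t rest ih =>
    intro k s j i h
    by_cases ht : t == s
    · simp only [idxsF, if_pos ht, List.singleton_append] at h
      cases j with
      | zero =>
        simp at h
        exact ⟨0, by simp [h], by simp, by simpa using (beq_iff_eq.mp ht), by simp⟩
      | succ j =>
        simp only [List.getElem?_cons_succ] at h
        obtain ⟨q, hi, hq, hsq, hc⟩ := ih (k + 1) s j i h
        refine ⟨q + 1, by push_cast [hi]; ring, by simpa using Nat.succ_lt_succ hq,
          by simpa using hsq, ?_⟩
        simp [beq_iff_eq.mp ht, hc]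
    · simp only [idxsF, if_neg ht, List.nil_append] at h
      obtain ⟨q, hi, hq, hsq, hc⟩ := ih (k + 1) s j i h
      refine ⟨q + 1, by push_cast [hi]; ring, by simpa using Nat.succ_lt_succ hq,
        by simpa using hsq, ?_⟩
      have : ¬ t = s := by simpa using ht
      simp [this, hc]

theorem idxsF_getElem?_self (ss : List String) : ∀ (k : Int) (q : Nat) (hq : q < ss.length),
    (idxsF k ss ss[q])[(ss.take q).count ss[q]]? = some (k + q) := by
  induction ss with
  | nil => intro k q hq; simp at hq
  | cons t rest ih =>
    intro k q hq
    cases q with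
    | zero =>
      simp [idxsF]
    | succ q =>
      have hq' : q < rest.length := by simpa using hq
      have hgl : (t :: rest)[q + 1] = rest[q] := by simp
      rw [hgl]
      by_cases ht : t == rest[q]
      · have hteq : t = rest[q] := beq_iff_eq.mp ht
        simp only [idxsF, if_pos ht, List.take_succ_cons, List.count_cons, hteq,
          beq_self_eq_true, if_pos]
        rw [List.singleton_append, List.getElem?_cons_succ, ih (k + 1) q hq']
        congr 1
        push_cast
        ring
      · have hteq : ¬ t = rest[q] := by simpa using ht
        simp only [idxsF, if_neg ht, List.nil_append, List.take_succ_cons, List.count_cons]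
        simp only [hteq, Nat.add_zero]
        have := ih (k + 1) q hq'
        rw [this]
        congr 1
        push_cast
        ring

-- the grouping dict: per-key characterization, keys, values
theorem filter_swap_enum (ss : List String) : ∀ (k : Int) (s : String),
    ((((PySem.List.enumerate ss k).map Prod.swap).filter (fun p => p.1 == s)).map (fun x => x.2))
      = idxsF k ss s := by
  induction ss with
  | nil => intro k s; simp [PySem.List.enumerate_nil, idxsF]
  | cons t rest ih =>
    intro k s
    rw [PySem.List.enumerate_cons]
    by_cases ht : t == s <;> simp [idxsF, ht, ih (k + 1) s, Prod.swap]

theorem groups_getD (ss : List String) (s : String) :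
    (avoidRepeatGroups ss).getD s [] = idxsF 0 ss s := by
  unfold avoidRepeatGroups
  have hswap : (PySem.List.enumerate ss).foldl
      (fun d p => d.modify p.2 [] (fun v => v ++ [p.1])) PySem.Dict.empty
      = ((PySem.List.enumerate ss).map Prod.swap).foldl
      (fun d p => d.modify p.1 [] (fun v => v ++ [p.2])) PySem.Dict.empty := by
    rw [List.foldl_map]
    rfl
  rw [hswap, PySem.Dict.getD_foldl_modify_append, PySem.Dict.getD_empty, List.nil_append]
  exact filter_swap_enum ss 0 s

theorem groups_keys (ss : List String) : (avoidRepeatGroups ss).keys = PySem.Set.ofList ss := by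
  unfold avoidRepeatGroups
  rw [PySem.Dict.keys_foldl_modify_key (PySem.List.enumerate ss) (fun p => p.2) []
      (fun _ p => (fun v => v ++ [p.1])) PySem.Dict.empty]
  rw [PySem.Dict.keys_empty, PySem.List.map_snd_enumerate, PySem.Set.update_nil_left]

theorem groups_values (ss : List String) :
    (avoidRepeatGroups ss).values = (PySem.Set.ofList ss).map (fun s => idxsF 0 ss s) := by
  have hnd : (avoidRepeatGroups ss).keys.Nodup := by
    rw [groups_keys]; exact PySem.Set.nodup_ofList ss
  have h := PySem.Dict.items_eq_map_keys (avoidRepeatGroups ss) hnd []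
  show (avoidRepeatGroups ss).items.map (fun p => p.2) = _
  rw [h, List.map_map, groups_keys]
  exact List.map_congr_left (fun s _ => groups_getD ss s)

-- the write-back fold, generically over a list of (counter, position) updates
def updFold (ss : List String) (U : List (Int × Int)) (r : List String) : List String :=
  U.foldl (fun r p => PySem.List.pySetD r p.2
    (PySem.List.pyGetD ss p.2 "" ++ "." ++ PySem.Int.toStr p.1)) r

theorem updFold_length (ss : List String) (U : List (Int × Int)) : ∀ r,
    (updFold ss U r).length = r.length := by
  induction U with
  | nil => intro r; rfl
  | cons p rest ih =>
    intro r
    show (updFold ss rest _).length = r.length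
    rw [ih, PySem.List.length_pySetD]

theorem updFold_untouched (ss : List String) (U : List (Int × Int)) (q : Nat) :
    ∀ r, (∀ p ∈ U, 0 ≤ p.2 ∧ p.2 ≠ (q : Int)) → (updFold ss U r)[q]? = r[q]? := by
  induction U with
  | nil => intro r _; rfl
  | cons p rest ih =>
    intro r h
    obtain ⟨h0, hne⟩ := h p (by simp)
    show (updFold ss rest _)[q]? = r[q]?
    rw [ih _ (fun p hp => h p (by simp [hp]))]
    show (PySem.List.pySetD r p.2 _)[q]? = r[q]?
    rw [PySem.List.pySetD_of_nonneg _ _ h0]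
    apply List.getElem?_set_ne
    intro hEq
    apply hne
    omega

theorem updFold_set (ss : List String) (U1 U2 : List (Int × Int)) (c : Int) (q : Nat)
    (r : List String) (hq : q < r.length) (hU2 : ∀ p ∈ U2, 0 ≤ p.2 ∧ p.2 ≠ (q : Int)) :
    (updFold ss (U1 ++ (c, (q : Int)) :: U2) r)[q]? =
      some (PySem.List.pyGetD ss (q : Int) "" ++ "." ++ PySem.Int.toStr c) := by
  unfold updFold
  rw [List.foldl_append, List.foldl_cons]
  have h1 : List.foldl (fun r p => PySem.List.pySetD r p.2
      (PySem.List.pyGetD ss p.2 "" ++ "." ++ PySem.Int.toStr p.1)) r U1 = updFold ss U1 r := rfl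
  rw [h1]
  have hlen : (updFold ss U1 r).length = r.length := updFold_length ss U1 r
  have h2 := updFold_untouched ss U2 q
      (PySem.List.pySetD (updFold ss U1 r) (q : Int)
        (PySem.List.pyGetD ss (q : Int) "" ++ "." ++ PySem.Int.toStr c)) hU2
  show (updFold ss U2 _)[q]? = _
  rw [h2]
  rw [PySem.List.pySetD_natCast]
  exact List.getElem?_set_self (by omega)

theorem write_length (ss : List String) (r : List String) (idxs : List Int) :
    (avoidRepeatWrite ss r idxs).length = r.length := by
  unfold avoidRepeatWrite
  exact updFold_length ss _ r

-- a group of a different string never touches position q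
theorem write_other (ss : List String) (s : String) (q : Nat) (hq : q < ss.length)
    (hne : ss[q] ≠ s) (r : List String) :
    (avoidRepeatWrite ss r (idxsF 0 ss s))[q]? = r[q]? := by
  unfold avoidRepeatWrite
  rw [PySem.List.slice_from_one]
  apply updFold_untouched
  intro p hp
  obtain ⟨k, hk, hpe⟩ := (PySem.List.mem_enumerate_iff _ _ _).mp hp
  have hmem : p.2 ∈ idxsF 0 ss s := by
    rw [hpe]
    exact (List.tail_sublist _).mem (List.getElem_mem hk)
  obtain ⟨q', hi, hq', hsq'⟩ := idxsF_mem ss 0 s p.2 hmem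
  constructor
  · omega
  · intro hc
    have : q' = q := by omega
    subst this
    exact hne (hsq' ▸ rfl)

-- the group of ss[q] writes '.'+c at q when its prefix count c is positive, else leaves it
theorem write_self (ss : List String) (q : Nat) (hq : q < ss.length) (r : List String)
    (hr : r.length = ss.length) :
    (avoidRepeatWrite ss r (idxsF 0 ss ss[q]))[q]? =
      if (ss.take q).count ss[q] = 0 then r[q]?
      else some (ss[q] ++ "." ++ PySem.Int.toStr (((ss.take q).count ss[q] : Nat) : Int)) := by
  set s := ss[q] with hs
  set c := (ss.take q).count s with hc
  set I := idxsF 0 ss s with hI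
  have hIc : I[c]? = some ((q : Int)) := by
    have := idxsF_getElem?_self ss 0 q hq
    simpa using this
  have huniq : ∀ (j : Nat) (i : Int), I[j]? = some i → i = (q : Int) → j = c := by
    intro j i hj hiq
    obtain ⟨q', hi, hq', hsq', hcnt⟩ := idxsF_getElem?_some ss 0 s j i hj
    have : q' = q := by omega
    subst this
    omega
  unfold avoidRepeatWrite
  rw [PySem.List.slice_from_one]
  by_cases h0 : c = 0
  · rw [if_pos h0]
    apply updFold_untouched
    intro p hp
    obtain ⟨k, hk, hpe⟩ := (PySem.List.mem_enumerate_iff _ _ _).mp hp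
    have hjt : I[k + 1]? = some I.tail[k] := by
      rw [← List.getElem?_tail]
      exact List.getElem?_eq_getElem hk
    constructor
    · obtain ⟨q', hi, _, _⟩ := idxsF_mem ss 0 s p.2 (by
        rw [hpe]; exact (List.tail_sublist _).mem (List.getElem_mem hk))
      omega
    · intro hcq
      have := huniq (k + 1) I.tail[k] hjt (by rw [← hcq, hpe])
      omega
  · rw [if_neg h0]
    have hc1 : 1 ≤ c := Nat.one_le_iff_ne_zero.mpr h0
    have hTc : I.tail[c - 1]? = some ((q : Int)) := by
      rw [List.getElem?_tail]
      have : c - 1 + 1 = c := by omega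
      rw [this]
      exact hIc
    have hclen : c - 1 < I.tail.length := (List.getElem?_eq_some_iff.mp hTc).1
    have hget : I.tail[c - 1]'hclen = (q : Int) := by
      have h1 := List.getElem?_eq_getElem hclen
      rw [h1] at hTc
      exact Option.some.inj hTc
    have hTsplit : I.tail = I.tail.take (c - 1) ++ (q : Int) :: I.tail.drop c := by
      have h2 : I.tail.drop (c - 1) = (q : Int) :: I.tail.drop c := by
        rw [← List.getElem_cons_drop hclen, hget, show c - 1 + 1 = c from by omega]
      rw [← h2, List.take_append_drop]
    have htl : (I.tail.take (c - 1)).length = c - 1 := by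
      rw [List.length_take]
      omega
    have hU2 : ∀ p ∈ PySem.List.enumerate (I.tail.drop c) ((c : Int) + 1),
        0 ≤ p.2 ∧ p.2 ≠ (q : Int) := by
      intro p hp
      obtain ⟨k, hk, hpe⟩ := (PySem.List.mem_enumerate_iff _ _ _).mp hp
      have hck : c + k < I.tail.length := by
        have := hk
        rw [List.length_drop] at this
        omega
      have hdg : (I.tail.drop c)[k] = I.tail[c + k]'hck := List.getElem_drop
      have hIg : I[c + k + 1]? = some (I.tail[c + k]'hck) := by
        rw [← List.getElem?_tail]
        exact List.getElem?_eq_getElem hck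
      constructor
      · obtain ⟨q', hi, _, _⟩ := idxsF_mem ss 0 s p.2 (by
          rw [hpe, hdg]
          exact (List.tail_sublist _).mem (List.getElem_mem hck))
        omega
      · intro hcq
        have := huniq (c + k + 1) (I.tail[c + k]'hck) hIg (by rw [← hdg, ← hcq, hpe])
        omega
    have hmain := updFold_set ss (PySem.List.enumerate (I.tail.take (c - 1)) 1)
      (PySem.List.enumerate (I.tail.drop c) ((c : Int) + 1)) ((c : Nat) : Int) q r (by omega) hU2
    have hgd : PySem.List.pyGetD ss ((q : Nat) : Int) "" = ss[q] := by
      rw [PySem.List.pyGetD_natCast]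
      exact List.getD_eq_getElem ss "" hq
    rw [hgd] at hmain
    have hcast : (1 : Int) + ((c - 1 : Nat) : Int) = ((c : Nat) : Int) := by
      omega
    calc ((PySem.List.enumerate I.tail 1).foldl
            (fun r p => PySem.List.pySetD r p.2
              (PySem.List.pyGetD ss p.2 "" ++ "." ++ PySem.Int.toStr p.1)) r)[q]?
        = (updFold ss (PySem.List.enumerate (I.tail.take (c - 1)) 1 ++
            (((c : Nat) : Int), (q : Int)) ::
            PySem.List.enumerate (I.tail.drop c) ((c : Int) + 1)) r)[q]? := by
          rw [show (PySem.List.enumerate I.tail 1) =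
              PySem.List.enumerate (I.tail.take (c - 1)) 1 ++
              (((c : Nat) : Int), (q : Int)) ::
              PySem.List.enumerate (I.tail.drop c) ((c : Int) + 1) from by
            conv_lhs => rw [hTsplit]
            rw [PySem.List.enumerate_append, htl, PySem.List.enumerate_cons, hcast]]
          rfl
      _ = some (ss[q] ++ "." ++ PySem.Int.toStr ((c : Nat) : Int)) := hmain

-- the outer fold over the groups of strings other than ss[q] leaves position q alone
theorem outer_untouched (ss : List String) (q : Nat) (hq : q < ss.length) (Gs : List String) :
    ∀ r, (∀ s ∈ Gs, ss[q] ≠ s) →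
    (Gs.foldl (fun r s => avoidRepeatWrite ss r (idxsF 0 ss s)) r)[q]? = r[q]? := by
  induction Gs with
  | nil => intro r _; rfl
  | cons s rest ih =>
    intro r h
    rw [List.foldl_cons, ih _ (fun t ht => h t (by simp [ht]))]
    exact write_other ss s q hq (h s (by simp)) r

theorem outer_length (ss : List String) (Gs : List String) : ∀ r,
    (Gs.foldl (fun r s => avoidRepeatWrite ss r (idxsF 0 ss s)) r).length = r.length := by
  induction Gs with
  | nil => intro r; rfl
  | cons s rest ih =>
    intro r
    rw [List.foldl_cons, ih, write_length]

theorem outer_main (ss : List String) (q : Nat) (hq : q < ss.length) :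
    ((avoidRepeatGroups ss).values.foldl (avoidRepeatWrite ss) ss)[q]? =
      some (if (ss.take q).count ss[q] = 0 then ss[q]
            else ss[q] ++ "." ++ PySem.Int.toStr (((ss.take q).count ss[q] : Nat) : Int)) := by
  rw [groups_values, List.foldl_map]
  have hmem : ss[q] ∈ PySem.Set.ofList ss :=
    (PySem.Set.mem_ofList _ _).mpr (List.getElem_mem hq)
  obtain ⟨G1, G2, hsplit⟩ := List.append_of_mem hmem
  have hnd : (PySem.Set.ofList ss).Nodup := PySem.Set.nodup_ofList ss
  rw [hsplit] at hnd
  have hG1 : ss[q] ∉ G1 := by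
    intro hmem1
    exact (List.disjoint_of_nodup_append hnd) hmem1 (by simp)
  have hG2 : ss[q] ∉ G2 := by
    have := (List.nodup_append.mp hnd).2.1
    exact (List.nodup_cons.mp this).1
  rw [hsplit, List.foldl_append, List.foldl_cons]
  rw [outer_untouched ss q hq G2 _ (fun t ht hc => hG2 (hc ▸ ht))]
  have hlen1 : (G1.foldl (fun r s => avoidRepeatWrite ss r (idxsF 0 ss s)) ss).length = ss.length :=
    outer_length ss G1 ss
  rw [write_self ss q hq _ hlen1]
  rw [outer_untouched ss q hq G1 ss (fun t ht hc => hG1 (hc ▸ ht))]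
  by_cases h0 : (ss.take q).count ss[q] = 0
  · rw [if_pos h0, if_pos h0, List.getElem?_eq_getElem hq]
  · rw [if_neg h0, if_neg h0]

theorem alt_getElem? (l : List Int) (q : Nat) (hq : q < (l.map PySem.Int.toStr).length) :
    (avoid_repeat_alt l)[q]? =
      some (if ((l.map PySem.Int.toStr).take q).count (l.map PySem.Int.toStr)[q] = 0
            then (l.map PySem.Int.toStr)[q]
            else (l.map PySem.Int.toStr)[q] ++ "." ++
              PySem.Int.toStr ((((l.map PySem.Int.toStr).take q).count
                (l.map PySem.Int.toStr)[q] : Nat) : Int)) :=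
  outer_main (l.map PySem.Int.toStr) q hq

theorem alt_length (l : List Int) : (avoid_repeat_alt l).length = (l.map PySem.Int.toStr).length := by
  show ((avoidRepeatGroups _).values.foldl (avoidRepeatWrite _) _).length = _
  rw [groups_values, List.foldl_map]
  exact outer_length _ _ _

-- ===== VERDICT (by name: the statement is the Claim_ definition above) =====
theorem avoid_repeat_spec : Claim_equal_avoid_repeat := by
  intro l _
  show avoid_repeat l = avoid_repeat_alt l
  have hA : avoid_repeat l = specGo [] (l.map PySem.Int.toStr) := by
    unfold avoid_repeat
    exact goA_eq_specGo _ _ [] (by intro t; simp [PySem.Dict.get?_empty])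
  rw [hA]
  apply List.ext_getElem?
  intro q
  by_cases hq : q < (l.map PySem.Int.toStr).length
  · rw [specGo_getElem? _ [] q hq, alt_getElem? l q hq]
    simp
  · rw [List.getElem?_eq_none, List.getElem?_eq_none]
    · rw [alt_length]; omega
    · rw [length_specGo]; omega
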